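-- pv_equiv track=rewrite | github.com/MJmaolu/DVGfinder | Models/cribadoML.py | count_TP_FP_FN
-- ===== SOURCE A (Python) =====
-- def count_TP_FP_FN(is_class_vector):
--     """
--     Retorna los valores
--     """
--     TP = FP = FN = TN = 0
--
--     for c in is_class_vector:
--         if c == 'TP':
--             TP += 1
--         elif c == 'FP':
--             FP += 1
--         elif c == 'FN':
--             FN += 1
--         elif c == 'TN':
--             TN += 1
--     contingency_dict = {'TP' : TP, 'FP' : FP, 'FN' : FN}
--
--     return contingency_dict
-- ===== SOURCE B (Python) =====
-- def count_TP_FP_FN(is_class_vector):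
--     return {lab: is_class_vector.count(lab) for lab in ('TP', 'FP', 'FN')}
-- ===== Notes on version B (the rewrite author's own statement) =====
-- stated objective: simpler
-- what changed: Replaces the single pass with four if/elif branches and a TN counter by a dict comprehension doing one .count scan per returned label, dropping the never-returned TN tally.
import Mathlib
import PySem

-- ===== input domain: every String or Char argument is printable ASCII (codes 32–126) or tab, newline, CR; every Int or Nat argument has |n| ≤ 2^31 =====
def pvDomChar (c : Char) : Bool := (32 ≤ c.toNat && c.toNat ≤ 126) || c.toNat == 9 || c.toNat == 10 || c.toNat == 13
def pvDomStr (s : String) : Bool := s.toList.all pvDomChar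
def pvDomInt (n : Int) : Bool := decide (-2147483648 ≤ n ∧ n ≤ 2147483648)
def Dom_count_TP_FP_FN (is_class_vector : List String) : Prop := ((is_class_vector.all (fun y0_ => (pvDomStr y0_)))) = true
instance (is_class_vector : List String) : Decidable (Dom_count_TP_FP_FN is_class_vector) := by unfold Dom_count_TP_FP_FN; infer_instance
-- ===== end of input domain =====

-- B replaces A's single four-branch pass (with an unused TN tally) by one .count scan per returned label: simpler.


-- ===== PORT A =====
-- loop body of A: the four if/elif branches updating the (TP, FP, FN, TN) state
def stepA (st : Int × Int × Int × Int) (c : String) : Int × Int × Int × Int :=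
  if c == "TP" then (st.1 + 1, st.2.1, st.2.2.1, st.2.2.2)
  else if c == "FP" then (st.1, st.2.1 + 1, st.2.2.1, st.2.2.2)
  else if c == "FN" then (st.1, st.2.1, st.2.2.1 + 1, st.2.2.2)
  else if c == "TN" then (st.1, st.2.1, st.2.2.1, st.2.2.2 + 1)
  else st

-- single pass with four branches over one (TP,FP,FN,TN) state, then the dict
def count_TP_FP_FN (is_class_vector : List String) : List (String × Int) :=
  let s := is_class_vector.foldl stepA (0, 0, 0, 0)
  [("TP", s.1), ("FP", s.2.1), ("FN", s.2.2.1)]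

-- ===== PORT B =====
-- one .count scan per returned label
def count_TP_FP_FN_alt (is_class_vector : List String) : List (String × Int) :=
  ["TP", "FP", "FN"].map (fun lab => (lab, PySem.List.count is_class_vector lab))

-- ===== PRECONDITION & SPEC =====
def Spec_count_TP_FP_FN (is_class_vector : List String) (out : List (String × Int)) : Prop := out = count_TP_FP_FN_alt is_class_vector
instance (is_class_vector : List String) (out : List (String × Int)) : Decidable (Spec_count_TP_FP_FN is_class_vector out) := by unfold Spec_count_TP_FP_FN; infer_instance

-- ===== CLAIM (what is proved, stated in full; the proofs are below) =====
def Claim_equal_count_TP_FP_FN : Prop := ∀ (is_class_vector : List String), Dom_count_TP_FP_FN is_class_vector → Spec_count_TP_FP_FN is_class_vector (count_TP_FP_FN is_class_vector)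

-- ===== LEMMAS AND PROOFS =====

lemma count_loop_inv (xs : List String) (tp fp fn tn : Int) :
    xs.foldl stepA (tp, fp, fn, tn)
    = (tp + PySem.List.count xs "TP", fp + PySem.List.count xs "FP",
       fn + PySem.List.count xs "FN", tn + PySem.List.count xs "TN") := by
  induction xs generalizing tp fp fn tn with
  | nil => simp [PySem.List.count]
  | cons c cs ih =>
      rw [List.foldl_cons]
      by_cases h1 : c = "TP"
      · rw [show stepA (tp, fp, fn, tn) c = (tp + 1, fp, fn, tn) by simp [stepA, h1], ih]
        simp [PySem.List.count_eq, List.count_cons, h1]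
        all_goals omega
      · by_cases h2 : c = "FP"
        · rw [show stepA (tp, fp, fn, tn) c = (tp, fp + 1, fn, tn) by simp [stepA, h2], ih]
          simp [PySem.List.count_eq, List.count_cons, h1, h2, Ne.symm h1]
          all_goals omega
        · by_cases h3 : c = "FN"
          · rw [show stepA (tp, fp, fn, tn) c = (tp, fp, fn + 1, tn) by
                simp [stepA, h1, h2, h3], ih]
            simp [PySem.List.count_eq, List.count_cons, Ne.symm h1, Ne.symm h2, h3]
            all_goals omega
          · by_cases h4 : c = "TN"
            · rw [show stepA (tp, fp, fn, tn) c = (tp, fp, fn, tn + 1) by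
                  simp [stepA, h1, h2, h3, h4], ih]
              simp [PySem.List.count_eq, List.count_cons, Ne.symm h1, Ne.symm h2, Ne.symm h3, h4]
              all_goals omega
            · rw [show stepA (tp, fp, fn, tn) c = (tp, fp, fn, tn) by
                  simp [stepA, h1, h2, h3, h4], ih]
              simp [PySem.List.count_eq, List.count_cons,
                Ne.symm h1, Ne.symm h2, Ne.symm h3, Ne.symm h4]
              exact ⟨h1, h2, h3, h4⟩

-- ===== VERDICT (by name: the statement is the Claim_ definition above) =====
theorem count_TP_FP_FN_spec : Claim_equal_count_TP_FP_FN := by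
  intro xs _
  show count_TP_FP_FN xs = count_TP_FP_FN_alt xs
  unfold count_TP_FP_FN count_TP_FP_FN_alt
  rw [count_loop_inv]
  simp
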